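-- pv_equiv track=rewrite | github.com/ozgung/aoc | aoc2023/day13_1.py | find_mirror
-- ===== SOURCE A (Python) =====
-- def find_mirror(sums):
--
--     found = False
--
--     for i in range(0, len(sums)-1):
--         if sums[i] == sums[i+1]:
--             found = True
--             for j in range(i, -1, -1):
--                 r = 2*i-j+1
--                 if r < len(sums) and sums[j] != sums[r]:
--                     found = False
--                     break
--             if found:
--                 break
--
--
--     return i + 1 if found else 0
-- ===== SOURCE B (Python) =====
-- def find_mirror(sums):
--     n = len(sums)
--     # Elimination by pairs: axis k is a mirror iff every pair (a, b) with a+b = 2k-1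
--     # and both indices in range agrees.  Instead of verifying each candidate centre,
--     # sweep all index pairs once and knock out every axis a disagreeing pair refutes,
--     # then return the smallest surviving axis.
--     valid = [True] * (n + 1)
--     for a in range(n):
--         for b in range(a + 1, n):
--             if (a + b) % 2 == 1 and sums[a] != sums[b]:
--                 valid[(a + b + 1) // 2] = False
--     for k in range(1, n):
--         if valid[k]:
--             return k
--     return 0
-- ===== Notes on version B (the rewrite author's own statement) =====
-- stated objective: alternative
-- what changed: A scans candidate centres and verifies each with an inner mirror-index loop; B inverts the traversal: one sweep over all index pairs eliminates every axis refuted by a disagreeing odd-distance pair in a boolean validity table, then the smallest surviving axis is returned.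
import Mathlib
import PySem

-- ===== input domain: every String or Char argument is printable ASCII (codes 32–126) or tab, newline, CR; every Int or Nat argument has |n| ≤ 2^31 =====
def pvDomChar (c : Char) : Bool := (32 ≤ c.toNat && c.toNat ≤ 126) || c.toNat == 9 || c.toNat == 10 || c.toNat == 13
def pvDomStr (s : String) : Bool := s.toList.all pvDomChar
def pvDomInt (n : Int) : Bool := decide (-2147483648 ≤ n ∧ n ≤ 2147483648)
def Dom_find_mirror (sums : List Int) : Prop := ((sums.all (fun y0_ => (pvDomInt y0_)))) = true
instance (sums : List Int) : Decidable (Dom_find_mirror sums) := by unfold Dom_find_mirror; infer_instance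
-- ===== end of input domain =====

-- B inverts the traversal: instead of verifying each candidate centre with an inner mirror
-- loop, one sweep over all index pairs eliminates every axis refuted by a disagreeing
-- odd-distance pair, then the smallest surviving axis is returned (alternative, same cost class).

-- ===== PORT A =====
def findA_inner (sums : List Int) (i : Int) : Bool :=
  (PySem.List.pyRange i (-1) (-1)).all (fun j =>
    !(decide (2 * i - j + 1 < (sums.length : Int)) &&
      !(PySem.List.pyGet? sums j == PySem.List.pyGet? sums (2 * i - j + 1))))

def findA_cond (sums : List Int) (i : Int) : Bool :=
  (PySem.List.pyGet? sums i == PySem.List.pyGet? sums (i + 1)) && findA_inner sums i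

def findA_loop (sums : List Int) : List Int → Int
  | [] => 0
  | i :: rest => if findA_cond sums i then i + 1 else findA_loop sums rest

def find_mirror (sums : List Int) : Int :=
  findA_loop sums (PySem.List.pyRange 0 ((sums.length : Int) - 1) 1)

-- ===== PORT B =====
-- one pair elimination step: knock the axis (a+b+1)/2 out of the validity table
-- (all loop indices are nonnegative, so Nat ranges/indices transcribe Python's exactly)
def elimStep (sums : List Int) (v : List Bool) (a b : Nat) : List Bool :=
  if (a + b) % 2 = 1 ∧ sums[a]? ≠ sums[b]? then v.set ((a + b + 1) / 2) false else v

def elimPairs (sums : List Int) : List Bool :=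
  (List.range sums.length).foldl (fun v a =>
    (List.range' (a + 1) (sums.length - (a + 1))).foldl (fun v b => elimStep sums v a b) v)
    (List.replicate (sums.length + 1) true)

def scanValid (v : List Bool) : List Nat → Int
  | [] => 0
  | k :: rest => if v.getD k false then (k : Int) else scanValid v rest

def find_mirror_alt (sums : List Int) : Int :=
  scanValid (elimPairs sums) (List.range' 1 (sums.length - 1))

-- ===== PRECONDITION & SPEC =====
def Spec_find_mirror (sums : List Int) (out : Int) : Prop := out = find_mirror_alt sums
instance (sums : List Int) (out : Int) : Decidable (Spec_find_mirror sums out) := by unfold Spec_find_mirror; infer_instance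

-- ===== CLAIM (what is proved, stated in full; the proofs are below) =====
def Claim_equal_find_mirror : Prop := ∀ (sums : List Int), Dom_find_mirror sums → Spec_find_mirror sums (find_mirror sums)

-- ===== LEMMAS AND PROOFS =====

-- A's candidate test holds iff every in-range mirror pair around centre k agrees
lemma condA_iff (sums : List Int) (k : Nat) (hk : k + 1 < sums.length) :
    findA_cond sums (k : Int) = true ↔
      ∀ m : Nat, m ≤ k → k + 1 + m < sums.length → sums[k - m]? = sums[k + 1 + m]? := by
  have cast1 : ((k : Int) + 1) = ((k + 1 : Nat) : Int) := by push_cast; ring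
  simp only [findA_cond, findA_inner, Bool.and_eq_true, List.all_eq_true,
    PySem.List.mem_pyRange_neg_one, cast1, PySem.List.pyGet?_natCast, Bool.not_eq_eq_eq_not,
    Bool.not_true, Bool.and_eq_false_imp, decide_eq_true_eq, beq_iff_eq]
  constructor
  · rintro ⟨hadj, hall⟩ m hm hn
    have h1 : (-1 : Int) < ((k - m : Nat) : Int) := by omega
    have h2 : ((k - m : Nat) : Int) ≤ (k : Int) := by omega
    have hr : 2 * (k : Int) - ((k - m : Nat) : Int) + 1 = ((k + 1 + m : Nat) : Int) := by omega
    have hx := hall _ ⟨h1, h2⟩ (by omega)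
    simp only [hr, PySem.List.pyGet?_natCast, Bool.not_false, beq_iff_eq] at hx
    exact hx
  · intro h
    refine ⟨by simpa using h 0 (Nat.zero_le _) (by omega), ?_⟩
    intro x h1 h2
    obtain ⟨j, rfl⟩ := Int.eq_ofNat_of_zero_le (by omega : (0:Int) ≤ x)
    have hj : j ≤ k := by exact_mod_cast h1.2
    have hr : 2 * (k : Int) - (j : Int) + 1 = ((k + 1 + (k - j) : Nat) : Int) := by omega
    have hn : k + 1 + (k - j) < sums.length := by omega
    have := h (k - j) (by omega) hn
    simp only [hr, PySem.List.pyGet?_natCast, Bool.not_false, beq_iff_eq]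
    simpa [show k - (k - j) = j from by omega] using this

-- setting an entry to false, read through getElem?/getD
lemma getD_set_false (v : List Bool) (j k : Nat) :
    (v.set j false).getD k false = (v.getD k false && !(j == k)) := by
  simp only [List.getD]
  by_cases h : j = k
  · subst h
    by_cases hl : j < v.length
    · rw [List.getElem?_set_self (by simpa using hl)]
      simp
    · rw [List.getElem?_eq_none (by simpa using Nat.le_of_not_lt hl)]
      simp
  · rw [List.getElem?_set_ne h]
    simp [h]

-- generic invariant: a fold of conditional set-false updates, read at k
lemma getD_foldl_elim {α : Type} (p : α → Prop) [DecidablePred p] (f : α → Nat)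
    (l : List α) (v : List Bool) (k : Nat) :
    ((l.foldl (fun v x => if p x then v.set (f x) false else v) v).getD k false)
      = (v.getD k false && l.all (fun x => !(decide (p x) && f x == k))) := by
  induction l generalizing v with
  | nil => simp
  | cons x t ih =>
      simp only [List.foldl_cons, List.all_cons]
      by_cases hp : p x
      · rw [if_pos hp, ih, getD_set_false]
        simp [hp, Bool.and_assoc]
      · rw [if_neg hp, ih]
        simp [hp]

lemma getD_foldl_elim2 (sums : List Int) (L : List Nat) (v : List Bool) (k : Nat) :
    ((L.foldl (fun v a =>
        (List.range' (a + 1) (sums.length - (a + 1))).foldl (fun v b => elimStep sums v a b) v)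
        v).getD k false)
      = (v.getD k false && L.all (fun a =>
          (List.range' (a + 1) (sums.length - (a + 1))).all (fun b =>
            !(decide ((a + b) % 2 = 1 ∧ sums[a]? ≠ sums[b]?) && (a + b + 1) / 2 == k)))) := by
  induction L generalizing v with
  | nil => simp
  | cons a t ih =>
      rw [List.foldl_cons, ih]
      simp only [elimStep]
      rw [getD_foldl_elim (fun b => (a + b) % 2 = 1 ∧ sums[a]? ≠ sums[b]?)
        (fun b => (a + b + 1) / 2)]
      simp [Bool.and_assoc]

lemma getD_elimPairs (sums : List Int) (k : Nat) (hk : k ≤ sums.length) :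
    (elimPairs sums).getD k false
      = (List.range sums.length).all (fun a =>
          (List.range' (a + 1) (sums.length - (a + 1))).all (fun b =>
            !(decide ((a + b) % 2 = 1 ∧ sums[a]? ≠ sums[b]?) && (a + b + 1) / 2 == k))) := by
  unfold elimPairs
  rw [getD_foldl_elim2]
  have hk' : k < sums.length + 1 := by omega
  simp [List.getD, hk']

-- B's table entry at axis k+1 agrees with A's candidate test at centre k
lemma valid_iff_condA (sums : List Int) (k : Nat) (hk : k + 1 < sums.length) :
    (elimPairs sums).getD (k + 1) false = findA_cond sums (k : Int) := by
  rw [Bool.eq_iff_iff, condA_iff sums k hk, getD_elimPairs sums (k + 1) (by omega)]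
  simp only [List.all_eq_true, List.mem_range, List.mem_range'_1, Bool.not_eq_eq_eq_not,
    Bool.not_true, Bool.and_eq_false_imp, decide_eq_true_eq, beq_eq_false_iff_ne, ne_eq,
    and_imp]
  constructor
  · intro h m hm hn
    by_contra he
    have hmod : ((k - m) + (k + 1 + m)) % 2 = 1 := by omega
    have hdiv : ((k - m) + (k + 1 + m) + 1) / 2 = k + 1 := by omega
    exact h (k - m) (by omega) (k + 1 + m) (by omega) (by omega) hmod he hdiv
  · intro h a _ b hb1 hb2 hodd hne heq
    have hsum : a + b = 2 * k + 1 := by omega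
    have e1 : k - (b - (k + 1)) = a := by omega
    have e2 : k + 1 + (b - (k + 1)) = b := by omega
    have := h (b - (k + 1)) (by omega) (by omega)
    rw [e1, e2] at this
    exact hne this

-- matched scans: A iterates centres i, B iterates axes i+1, over the same base list
lemma scans_eq (sums : List Int) (v : List Bool) :
    ∀ (l : List Nat), (∀ i ∈ l, findA_cond sums ((i : Nat) : Int) = v.getD (i + 1) false) →
      findA_loop sums (l.map (Nat.cast : Nat → Int)) = scanValid v (l.map (· + 1))
  | [], _ => rfl
  | a :: t, h => by
      rw [List.map_cons, List.map_cons]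
      simp only [findA_loop, scanValid]
      rw [h a (List.mem_cons_self ..)]
      split
      · push_cast; ring
      · exact scans_eq sums v t (fun i hi => h i (List.mem_cons_of_mem _ hi))

-- ===== VERDICT (by name: the statement is the Claim_ definition above) =====
theorem find_mirror_spec : Claim_equal_find_mirror := by
  intro sums _
  unfold Spec_find_mirror find_mirror find_mirror_alt
  have hr : PySem.List.pyRange 0 ((sums.length : Int) - 1) 1
      = (List.range (sums.length - 1)).map (Nat.cast : Nat → Int) := by
    rw [PySem.List.pyRange_one,
      show ((sums.length : Int) - 1 - 0).toNat = sums.length - 1 from by omega]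
    exact List.map_congr_left (fun k _ => by omega)
  have hr2 : List.range' 1 (sums.length - 1) = (List.range (sums.length - 1)).map (· + 1) := by
    rw [List.range'_eq_map_range]
    exact List.map_congr_left (fun k _ => by omega)
  rw [hr, hr2]
  refine scans_eq sums (elimPairs sums) _ (fun i hi => ?_)
  rw [List.mem_range] at hi
  exact (valid_iff_condA sums i (by omega)).symm
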